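-- pv_equiv track=rewrite | github.com/FabriceSalvaire/elbrea | test/test-image.py | histogram_to_path
-- ===== SOURCE A (Python) =====
-- def histogram_to_path(y_input):
--
--     x = 0
--     yc = 0
--     x_output = []
--     y_output = []
--     for y in y_input:
--         if y != yc:
--             x_output.append(x)
--             y_output.append(yc)
--             x_output.append(x)
--             y_output.append(y)
--             yc = y
--         x += 1
--     if yc != 0:
--         x_output.append(x)
--         y_output.append(yc)
--     x_output.append(x)
--     y_output.append(0)
--
--     return x_output, y_output
-- ===== SOURCE B (Python) =====
-- from itertools import groupby
--
--
-- def histogram_to_path(y_input):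
--     x = 0
--     prev = 0
--     x_output = []
--     y_output = []
--     for value, group in groupby(y_input):
--         if value != prev:
--             x_output += [x, x]
--             y_output += [prev, value]
--             prev = value
--         x += sum(1 for _ in group)
--     if prev != 0:
--         x_output.append(x)
--         y_output.append(prev)
--     x_output.append(x)
--     y_output.append(0)
--     return x_output, y_output
-- ===== Notes on version B (the rewrite author's own statement) =====
-- stated objective: alternative
-- what changed: B groups the input into runs of consecutive equal values with itertools.groupby and emits step coordinates once per run (advancing x by the run length), instead of A's element-by-element scan with a per-element comparison.
import Mathlib
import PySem

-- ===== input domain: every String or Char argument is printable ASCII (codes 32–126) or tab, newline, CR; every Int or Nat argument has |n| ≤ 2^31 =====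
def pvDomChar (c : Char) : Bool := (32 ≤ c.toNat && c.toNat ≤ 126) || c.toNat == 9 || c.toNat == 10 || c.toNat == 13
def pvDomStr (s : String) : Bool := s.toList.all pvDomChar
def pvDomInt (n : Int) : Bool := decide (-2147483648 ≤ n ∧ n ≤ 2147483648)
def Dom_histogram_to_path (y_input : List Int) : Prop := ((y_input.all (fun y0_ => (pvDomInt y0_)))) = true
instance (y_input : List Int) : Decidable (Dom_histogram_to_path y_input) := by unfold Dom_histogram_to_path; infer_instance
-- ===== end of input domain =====

-- B groups the input into runs of consecutive equal values (itertools.groupby) and emits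
-- step coordinates once per run instead of A's per-element scan; same cost, different decomposition.


-- ===== PORT A =====
-- A's loop over individual elements, state (x, yc, x_output, y_output); then the tail emissions.
def histA : List Int → Int → Int → List Int → List Int → List Int × List Int
  | [], x, yc, xout, yout =>
    let p := if yc ≠ 0 then (xout ++ [x], yout ++ [yc]) else (xout, yout)
    (p.1 ++ [x], p.2 ++ [0])
  | y :: ys, x, yc, xout, yout =>
    if y ≠ yc then histA ys (x + 1) y (xout ++ [x, x]) (yout ++ [yc, y])
    else histA ys (x + 1) yc xout yout

def histogram_to_path (y_input : List Int) : List Int × List Int :=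
  histA y_input 0 0 [] []

-- ===== PORT B =====
-- groupby: consecutive runs as (value, length) pairs.
def runsB : List Int → List (Int × Nat)
  | [] => []
  | y :: ys =>
    let pre := ys.takeWhile (· = y)
    let rest := ys.dropWhile (· = y)
    (y, pre.length + 1) :: runsB rest
termination_by ys => ys.length
decreasing_by
  simp only [List.length_cons]
  exact Nat.lt_succ_of_le (List.length_dropWhile_le _ _)

-- B's loop over runs, state (x, prev, x_output, y_output); then the tail emissions.
def histB : List (Int × Nat) → Int → Int → List Int → List Int → List Int × List Int
  | [], x, prev, xout, yout =>
    let p := if prev ≠ 0 then (xout ++ [x], yout ++ [prev]) else (xout, yout)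
    (p.1 ++ [x], p.2 ++ [0])
  | (v, len) :: rs, x, prev, xout, yout =>
    if v ≠ prev then histB rs (x + (len : Int)) v (xout ++ [x, x]) (yout ++ [prev, v])
    else histB rs (x + (len : Int)) prev xout yout

def histogram_to_path_alt (y_input : List Int) : List Int × List Int :=
  histB (runsB y_input) 0 0 [] []

-- ===== PRECONDITION & SPEC =====
def Spec_histogram_to_path (y_input : List Int) (out : List Int × List Int) : Prop := out = histogram_to_path_alt y_input
instance (y_input : List Int) (out : List Int × List Int) : Decidable (Spec_histogram_to_path y_input out) := by unfold Spec_histogram_to_path; infer_instance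

-- ===== CLAIM (what is proved, stated in full; the proofs are below) =====
def Claim_equal_histogram_to_path : Prop := ∀ (y_input : List Int), Dom_histogram_to_path y_input → Spec_histogram_to_path y_input (histogram_to_path y_input)

-- ===== LEMMAS AND PROOFS =====

-- A's loop skips elements equal to the current value yc, only advancing x.
theorem histA_skip (pre : List Int) (yc : Int) (h : ∀ a ∈ pre, a = yc) :
    ∀ (rest : List Int) (x : Int) (xout yout : List Int),
      histA (pre ++ rest) x yc xout yout = histA rest (x + pre.length) yc xout yout := by
  induction pre with
  | nil => intro rest x xout yout; simp
  | cons a pre ih =>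
    intro rest x xout yout
    have ha : a = yc := h a (by simp)
    simp only [List.cons_append, histA, ha, ne_eq, not_true_eq_false, if_false]
    rw [ih (fun b hb => h b (by simp [hb])) rest (x + 1)]
    congr 1
    simp only [List.length_cons]
    push_cast
    ring

theorem main_lemma : ∀ (n : Nat) (ys : List Int), ys.length ≤ n →
    ∀ (x yc : Int) (xout yout : List Int),
      histA ys x yc xout yout = histB (runsB ys) x yc xout yout := by
  intro n
  induction n with
  | zero =>
    intro ys h
    have : ys = [] := List.eq_nil_of_length_eq_zero (Nat.le_zero.mp h)
    subst this
    intro x yc xout yout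
    simp [histA, runsB, histB]
  | succ n ih =>
    intro ys h x yc xout yout
    cases ys with
    | nil => simp [histA, runsB, histB]
    | cons y ys =>
      have hpre : ∀ a ∈ ys.takeWhile (· = y), a = y := by
        intro a ha
        simpa using List.mem_takeWhile_imp ha
      have hsplit : ys.takeWhile (· = y) ++ ys.dropWhile (· = y) = ys :=
        List.takeWhile_append_dropWhile
      have hlen : (ys.dropWhile (· = y)).length ≤ n := by
        have := List.length_dropWhile_le (· = y) ys
        have hy : ys.length ≤ n := Nat.succ_le_succ_iff.mp h
        omega
      simp only [runsB]
      by_cases hy : y = yc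
      · subst hy
        simp only [histA, ne_eq, not_true_eq_false, ite_false]
        rw [histB]
        simp only [ne_eq, not_true_eq_false, ite_false]
        conv_lhs => rw [← hsplit]
        rw [histA_skip _ _ hpre, ih _ hlen]
        have harith : ∀ (L : Nat), x + 1 + (L : Int) = x + ((L + 1 : Nat) : Int) := by
          intro L; push_cast; ring
        rw [harith]
      · simp only [histA, ne_eq, hy, not_false_eq_true, ite_true]
        rw [histB]
        simp only [ne_eq, hy, not_false_eq_true, ite_true]
        conv_lhs => rw [← hsplit]
        rw [histA_skip _ _ hpre, ih _ hlen]
        have harith : ∀ (L : Nat), x + 1 + (L : Int) = x + ((L + 1 : Nat) : Int) := by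
          intro L; push_cast; ring
        rw [harith]

-- ===== VERDICT (by name: the statement is the Claim_ definition above) =====
theorem histogram_to_path_spec : Claim_equal_histogram_to_path := by
  intro y_input _
  unfold Spec_histogram_to_path histogram_to_path histogram_to_path_alt
  exact main_lemma y_input.length y_input le_rfl 0 0 [] []
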